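-- pv_equiv track=rewrite | github.com/NoahMauthe/decompilation_analysis | analysis/apkanalyzer.py | _process_fernflower_array_type
-- ===== SOURCE A (Python) =====
-- def _process_fernflower_array_type(type_string):
--     """Converts a fernflower-style array-type to an apkanalyzer compatible one.
--
--     Should only be called by _process_fernflower_type.
--
--     Parameters
--     ----------
--     type_string : str
--         A fernflower-style array-type.
--
--     Returns
--     -------
--     str
--         An apkanalyzer compatible array-type.
--     """
--     if type_string.startswith('L'):
--         return type_string[1:].replace('/', '.')
--     elif type_string.startswith('['):
--         type_string = type_string[1:]
--         return f'{_process_fernflower_array_type(type_string)}[]'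
--     elif type_string.startswith('I'):
--         return 'int'
--     elif type_string.startswith('V'):
--         return 'void'
--     elif type_string.startswith('Z'):
--         return 'boolean'
--     elif type_string.startswith('J'):
--         return 'long'
--     elif type_string.startswith('B'):
--         return 'byte'
--     elif type_string.startswith('F'):
--         return 'float'
--     elif type_string.startswith('C'):
--         return 'char'
--     elif type_string.startswith('D'):
--         return 'double'
--     elif type_string.startswith('S'):
--         return 'short'
--     else:
--         return type_string[0]
-- ===== SOURCE B (Python) =====
-- _PRIMITIVES = {'I': 'int', 'V': 'void', 'Z': 'boolean', 'J': 'long',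
--                'B': 'byte', 'F': 'float', 'C': 'char', 'D': 'double', 'S': 'short'}
--
--
-- def _process_fernflower_array_type(type_string):
--     dims = 0
--     while dims < len(type_string) and type_string[dims] == '[':
--         dims += 1
--     rest = type_string[dims:]
--     if rest.startswith('L'):
--         base = rest[1:].replace('/', '.')
--     else:
--         base = _PRIMITIVES.get(rest[0], rest[0])
--     return base + '[]' * dims
-- ===== Notes on version B (the rewrite author's own statement) =====
-- stated objective: idiomatic
-- what changed: Replaces the recursion over leading '[' brackets and the elif chain by a flat loop counting the dimensions, a single table lookup for the primitive base type, and one '[]'*dims append.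
import Mathlib
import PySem

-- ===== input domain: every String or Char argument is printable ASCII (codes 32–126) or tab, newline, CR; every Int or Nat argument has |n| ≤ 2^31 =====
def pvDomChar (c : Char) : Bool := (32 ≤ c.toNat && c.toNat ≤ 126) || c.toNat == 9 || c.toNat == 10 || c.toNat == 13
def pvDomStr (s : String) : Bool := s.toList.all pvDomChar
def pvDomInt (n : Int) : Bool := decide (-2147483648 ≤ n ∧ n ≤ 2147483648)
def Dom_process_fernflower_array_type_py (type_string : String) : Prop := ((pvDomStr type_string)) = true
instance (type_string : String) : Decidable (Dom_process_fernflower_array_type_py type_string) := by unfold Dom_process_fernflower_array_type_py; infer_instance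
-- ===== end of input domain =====

-- B replaces A's recursion over leading '[' and the elif chain by a flat bracket-counting
-- loop, one table lookup for the base type, and a single '[]'*dims append (idiomatic).

-- ===== PORT A =====
-- recursion on the char list; branch order follows A's elif chain exactly
def pvProcA : List Char → List Char
  | [] => []   -- Python raises IndexError here (type_string[0]); excluded by Pre_
  | c :: rest =>
    if c = 'L' then PySem.Chars.replace rest ['/'] ['.']
    else if c = '[' then pvProcA rest ++ ['[', ']']
    else if c = 'I' then ['i','n','t']
    else if c = 'V' then ['v','o','i','d']
    else if c = 'Z' then ['b','o','o','l','e','a','n']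
    else if c = 'J' then ['l','o','n','g']
    else if c = 'B' then ['b','y','t','e']
    else if c = 'F' then ['f','l','o','a','t']
    else if c = 'C' then ['c','h','a','r']
    else if c = 'D' then ['d','o','u','b','l','e']
    else if c = 'S' then ['s','h','o','r','t']
    else [c]

def process_fernflower_array_type_py (type_string : String) : String :=
  String.mk (pvProcA type_string.toList)

-- ===== PORT B =====
def pvPrimDict : PySem.Dict Char (List Char) :=
  PySem.Dict.mk [('I',['i','n','t']), ('V',['v','o','i','d']), ('Z',['b','o','o','l','e','a','n']),
    ('J',['l','o','n','g']), ('B',['b','y','t','e']), ('F',['f','l','o','a','t']),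
    ('C',['c','h','a','r']), ('D',['d','o','u','b','l','e']), ('S',['s','h','o','r','t'])]

-- the while-loop counting leading '[' characters
def pvCountBr : List Char → Nat
  | [] => 0
  | c :: rest => if c = '[' then pvCountBr rest + 1 else 0

-- base resolution of Source B: 'L' branch, else dict lookup with fallback rest[0]
def pvBaseB : List Char → List Char
  | [] => []   -- Python raises IndexError here (rest[0]); excluded by Pre_
  | c :: rest =>
    if c = 'L' then PySem.Chars.replace rest ['/'] ['.']
    else PySem.Dict.getD pvPrimDict c [c]

-- '[]' * dims
def pvRep : Nat → List Char
  | 0 => []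
  | n + 1 => pvRep n ++ ['[', ']']

def process_fernflower_array_type_py_alt (type_string : String) : String :=
  let l := type_string.toList
  let dims := pvCountBr l
  String.mk (pvBaseB (l.drop dims) ++ pvRep dims)

-- ===== PRECONDITION & SPEC =====
-- Pre_ excludes exactly the strings consisting only of '[' (incl. empty): there A raises
-- IndexError on type_string[0] (and B likewise on rest[0]).
def Pre_process_fernflower_array_type_py (type_string : String) : Prop :=
  type_string.toList.any (fun c => c ≠ '[') = true
instance (type_string : String) : Decidable (Pre_process_fernflower_array_type_py type_string) := by
  unfold Pre_process_fernflower_array_type_py; infer_instance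

def pvWitness_process_fernflower_array_type_py : String := "[I"

def Spec_process_fernflower_array_type_py (type_string : String) (out : String) : Prop := out = process_fernflower_array_type_py_alt type_string
instance (type_string : String) (out : String) : Decidable (Spec_process_fernflower_array_type_py type_string out) := by unfold Spec_process_fernflower_array_type_py; infer_instance

-- ===== CLAIM (what is proved, stated in full; the proofs are below) =====
def Claim_equal_process_fernflower_array_type_py : Prop := ∀ (type_string : String), Dom_process_fernflower_array_type_py type_string → Pre_process_fernflower_array_type_py type_string → Spec_process_fernflower_array_type_py type_string (process_fernflower_array_type_py type_string)

-- ===== LEMMAS AND PROOFS =====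

theorem pvBase_eq (c : Char) (rest : List Char) (hc : c ≠ '[') :
    pvProcA (c :: rest) = pvBaseB (c :: rest) := by
  simp only [pvProcA, pvBaseB]
  by_cases hL : c = 'L'
  · simp [hL]
  · simp only [hL, if_false, hc, if_false]
    by_cases hI : c = 'I' <;> by_cases hV : c = 'V' <;> by_cases hZ : c = 'Z' <;>
      by_cases hJ : c = 'J' <;> by_cases hB : c = 'B' <;> by_cases hF : c = 'F' <;>
      by_cases hC : c = 'C' <;> by_cases hD : c = 'D' <;> by_cases hS : c = 'S' <;>
      subst_vars <;>
      first
      | decide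
      | (have eI : ('I' == c) = false := by simp [Ne.symm hI]
         have eV : ('V' == c) = false := by simp [Ne.symm hV]
         have eZ : ('Z' == c) = false := by simp [Ne.symm hZ]
         have eJ : ('J' == c) = false := by simp [Ne.symm hJ]
         have eB : ('B' == c) = false := by simp [Ne.symm hB]
         have eF : ('F' == c) = false := by simp [Ne.symm hF]
         have eC : ('C' == c) = false := by simp [Ne.symm hC]
         have eD : ('D' == c) = false := by simp [Ne.symm hD]
         have eS : ('S' == c) = false := by simp [Ne.symm hS]
         simp [pvPrimDict, PySem.Dict.getD, PySem.Dict.get?, List.find?,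
           eI, eV, eZ, eJ, eB, eF, eC, eD, eS, hI, hV, hZ, hJ, hB, hF, hC, hD, hS])

theorem pvMain (l : List Char) (h : ∃ c ∈ l, c ≠ '[') :
    pvProcA l = pvBaseB (l.drop (pvCountBr l)) ++ pvRep (pvCountBr l) := by
  induction l with
  | nil => simp at h
  | cons c rest ih =>
    by_cases hc : c = '['
    · subst hc
      have hr : ∃ x ∈ rest, x ≠ '[' := by
        rcases h with ⟨x, hx, hne⟩
        rcases List.mem_cons.1 hx with e | m
        · exact (hne e).elim
        · exact ⟨x, m, hne⟩
      have : pvProcA ('[' :: rest) = pvProcA rest ++ ['[', ']'] := by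
        simp [pvProcA]
      rw [this, ih hr]
      simp [pvCountBr, pvRep, List.append_assoc]
    · rw [pvBase_eq c rest hc]
      simp [pvCountBr, hc, pvRep]

-- ===== VERDICT (by name: the statement is the Claim_ definition above) =====
theorem process_fernflower_array_type_py_spec : Claim_equal_process_fernflower_array_type_py := by
  intro s _ hpre
  unfold Pre_process_fernflower_array_type_py at hpre
  unfold Spec_process_fernflower_array_type_py process_fernflower_array_type_py process_fernflower_array_type_py_alt
  simp only []
  rw [pvMain s.toList (by simpa using List.any_eq_true.1 hpre)]
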